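-- pv_equiv track=rewrite | github.com/kteodorovich/advent_of_code_2024 | day2.py | report_good_with_skip
-- ===== SOURCE A (Python) =====
-- def adj_good(report, inc, i, j):
--   if i<0 or j<0 or i>=len(report) or j>=len(report):
--     return True
--
--   return ((1 <= abs(report[i] - report[j]) <= 3) and
--           ((inc and report[i] < report[j]) or
--           (not inc and report[i] > report[j])))
--
-- def report_good(report, inc):
--   if len(report) <= 1:
--     return True
--
--   for i in range(1, len(report)):
--     if not adj_good(report, inc, i-1, i):
--       return False
--
--   return True
--
-- def report_good_with_skip(report, inc):
--   if len(report) <= 1: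
--     return True
--
--   for i in range(1, len(report)):
--     if not adj_good(report, inc, i-1, i):
--         if adj_good(report,inc,i-2,i) and report_good(report[i:], inc):
--           return True
--         elif adj_good(report,inc,i-1,i+1) and report_good(report[i+1:], inc):
--           return True
--         return False
--
--   return True
-- ===== SOURCE B (Python) =====
-- def report_good_with_skip(report, inc):
--   def ok(xs):
--     return all(1 <= abs(y - x) <= 3 and (x < y if inc else x > y)
--                for x, y in zip(xs, xs[1:]))
--   if ok(report):
--     return True
--   return any(ok(report[:j] + report[j+1:]) for j in range(len(report)))
-- ===== Notes on version B (the rewrite author's own statement) =====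
-- stated objective: simpler
-- what changed: Replaced the one-pass local-repair scan (which, at the first bad adjacency, patches by testing index i-1 or i and rescanning only the suffix) with the canonical brute force: the report is safe iff it is monotonic-safe as-is or becomes so after deleting some single index j, rescanning the whole list for each candidate deletion.
import Mathlib
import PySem

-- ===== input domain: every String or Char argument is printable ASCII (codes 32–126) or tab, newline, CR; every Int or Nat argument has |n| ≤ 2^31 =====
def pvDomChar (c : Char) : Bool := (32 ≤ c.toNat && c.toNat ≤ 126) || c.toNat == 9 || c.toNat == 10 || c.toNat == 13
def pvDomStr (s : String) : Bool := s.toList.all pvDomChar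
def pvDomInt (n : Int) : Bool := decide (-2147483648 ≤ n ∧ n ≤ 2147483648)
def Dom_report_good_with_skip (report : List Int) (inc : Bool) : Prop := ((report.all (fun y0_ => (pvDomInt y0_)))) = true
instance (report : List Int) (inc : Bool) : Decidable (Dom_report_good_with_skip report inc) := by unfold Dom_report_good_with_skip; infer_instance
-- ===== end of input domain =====

-- B re-implements the one-pass local-repair check as the canonical brute force
-- (report good as-is, or good after removing some single index j); objective: simpler.


-- ===== PORT A =====

-- adj_good(report, inc, i, j); the guard ensures the two indexings are in range,
-- so the `.getD 0` default of pyGet? is unreachable.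
def adj_good (report : List Int) (inc : Bool) (i j : Int) : Bool :=
  if i < 0 || j < 0 || i ≥ (report.length : Int) || j ≥ (report.length : Int) then
    true
  else
    let a := (PySem.List.pyGet? report i).getD 0
    let b := (PySem.List.pyGet? report j).getD 0
    decide (1 ≤ |a - b| ∧ |a - b| ≤ 3) &&
      ((inc && decide (a < b)) || (!inc && decide (a > b)))

-- report_good(report, inc): early-return-False loop over range(1, len) = .all
def report_good (report : List Int) (inc : Bool) : Bool :=
  if report.length ≤ 1 then true
  else (PySem.List.pyRange 1 report.length 1).all
         (fun i => adj_good report inc (i - 1) i)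

-- the for-loop of report_good_with_skip, recursing over the remaining range list
def skipLoopA (report : List Int) (inc : Bool) : List Int → Bool
  | [] => true
  | i :: rest =>
    if !(adj_good report inc (i - 1) i) then
      if adj_good report inc (i - 2) i &&
         report_good (PySem.List.slice report (some i) none) inc then true
      else if adj_good report inc (i - 1) (i + 1) &&
              report_good (PySem.List.slice report (some (i + 1)) none) inc then true
      else false
    else skipLoopA report inc rest

def report_good_with_skip (report : List Int) (inc : Bool) : Bool :=
  if report.length ≤ 1 then true
  else skipLoopA report inc (PySem.List.pyRange 1 report.length 1)

-- ===== PORT B =====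

-- 1 <= abs(y - x) <= 3 and (x < y if inc else x > y)
def pairOk (inc : Bool) (x y : Int) : Bool :=
  decide ((1 ≤ |y - x| ∧ |y - x| ≤ 3) ∧ (if inc then x < y else x > y))

-- ok(xs) = all(... for x, y in zip(xs, xs[1:]))
def pairsOk (inc : Bool) (xs : List Int) : Bool :=
  (xs.zip xs.tail).all (fun p => pairOk inc p.1 p.2)

-- ok(report) or any(ok(report[:j] + report[j+1:]) for j in range(len(report)))
def report_good_with_skip_alt (report : List Int) (inc : Bool) : Bool :=
  pairsOk inc report ||
    (List.range report.length).any
      (fun j => pairsOk inc (report.take j ++ report.drop (j + 1)))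

-- ===== PRECONDITION & SPEC =====
def Spec_report_good_with_skip (report : List Int) (inc : Bool) (out : Bool) : Prop := out = report_good_with_skip_alt report inc
instance (report : List Int) (inc : Bool) (out : Bool) : Decidable (Spec_report_good_with_skip report inc out) := by unfold Spec_report_good_with_skip; infer_instance

-- ===== CLAIM (what is proved, stated in full; the proofs are below) =====
def Claim_equal_report_good_with_skip : Prop := ∀ (report : List Int) (inc : Bool), Dom_report_good_with_skip report inc → Spec_report_good_with_skip report inc (report_good_with_skip report inc)

-- ===== LEMMAS AND PROOFS =====

theorem adj_good_nat (xs : List Int) (inc : Bool) (a b : Nat)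
    (ha : a < xs.length) (hb : b < xs.length) :
    adj_good xs inc (a : Int) (b : Int) = pairOk inc xs[a] xs[b] := by
  have g1 : ¬ ((a:Int) < 0) := by omega
  simp only [adj_good, pairOk, PySem.List.pyGet?_natCast]
  rw [if_neg]
  · simp only [List.getElem?_eq_getElem ha, List.getElem?_eq_getElem hb, Option.getD_some]
    have habs : |xs[a] - xs[b]| = |xs[b] - xs[a]| := abs_sub_comm _ _
    cases inc <;> simp [habs]
  · simp; omega

theorem adj_good_neg_left (xs : List Int) (inc : Bool) (i j : Int) (h : i < 0) :
    adj_good xs inc i j = true := by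
  simp [adj_good, h]

theorem adj_good_ge_right (xs : List Int) (inc : Bool) (i j : Int)
    (h : (xs.length : Int) ≤ j) : adj_good xs inc i j = true := by
  simp [adj_good]
  omega

theorem pairsOk_iff (inc : Bool) (xs : List Int) :
    pairsOk inc xs = true ↔
      ∀ k, (h : k + 1 < xs.length) → pairOk inc xs[k] xs[k + 1] = true := by
  simp only [pairsOk, List.all_eq_true]
  constructor
  · intro H k h
    have hk : k < (xs.zip xs.tail).length := by
      simp [List.length_zip, List.length_tail]; omega
    have := H ((xs.zip xs.tail)[k]) (List.getElem_mem hk)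
    simpa [List.getElem_zip, List.getElem_tail] using this
  · intro H p hp
    obtain ⟨k, hk, hget⟩ := List.mem_iff_getElem.mp hp
    have hk' : k + 1 < xs.length := by
      simp [List.length_zip, List.length_tail] at hk; omega
    have := H k hk'
    rw [← hget]
    simpa [List.getElem_zip, List.getElem_tail] using this

theorem reportGood_eq (xs : List Int) (inc : Bool) :
    report_good xs inc = pairsOk inc xs := by
  unfold report_good
  split
  · rename_i h
    rw [eq_comm, pairsOk_iff]
    intro k hk; omega
  · rename_i h
    rw [Bool.eq_iff_iff, pairsOk_iff, List.all_eq_true]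
    constructor
    · intro H k hk
      have hmem : ((k:Int)+1) ∈ PySem.List.pyRange 1 xs.length 1 := by
        rw [PySem.List.mem_pyRange_one]; omega
      have := H _ hmem
      have e : ((k:Int)+1-1) = (k:Int) := by ring
      rw [e] at this
      rw [← adj_good_nat xs inc k (k+1) (by omega) hk]
      simpa using this
    · intro H i hi
      rw [PySem.List.mem_pyRange_one] at hi
      obtain ⟨h1, h2⟩ := hi
      set k := i.toNat - 1 with hk
      have hi' : i = ((k:Int)) + 1 := by omega
      have hkl : k + 1 < xs.length := by omega
      rw [hi']
      have e : ((k:Int)+1-1) = (k:Int) := by ring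
      rw [e]
      have : ((k:Int)+1) = ((k+1 : Nat) : Int) := by push_cast; ring
      rw [this, adj_good_nat xs inc k (k+1) (by omega) hkl]
      exact H k hkl

theorem skipLoopA_all (xs : List Int) (inc : Bool) :
    ∀ a : Nat, (∀ k : Nat, a ≤ k → k < xs.length →
        adj_good xs inc ((k:Int) - 1) (k:Int) = true) →
      skipLoopA xs inc (PySem.List.pyRange a xs.length 1) = true := by
  intro a
  induction hm : xs.length - a generalizing a with
  | zero =>
    intro _
    rw [PySem.List.pyRange_one_eq_nil (by omega)]
    rfl
  | succ m ih =>
    intro H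
    rw [PySem.List.pyRange_one_cons (by omega : (a:Int) < xs.length)]
    show skipLoopA xs inc ((a:Int) :: _) = true
    rw [skipLoopA]
    rw [H a le_rfl (by omega)]
    simp only [Bool.not_true, Bool.false_eq_true, if_false]
    have : ((a:Int) + 1) = ((a+1 : Nat) : Int) := by push_cast; ring
    rw [this]
    exact ih (a+1) (by omega) (fun k hk hk2 => H k (by omega) hk2)

-- the loop run from a reaches the first bad index i and returns A's branch value
theorem skipLoopA_first (xs : List Int) (inc : Bool) (i : Nat)
    (hin : i < xs.length)
    (hbad : adj_good xs inc ((i:Int) - 1) (i:Int) = false) :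
    ∀ a : Nat, a ≤ i →
    (∀ k : Nat, a ≤ k → k < i → adj_good xs inc ((k:Int) - 1) (k:Int) = true) →
      skipLoopA xs inc (PySem.List.pyRange a xs.length 1) =
        ((adj_good xs inc ((i:Int) - 2) (i:Int) &&
            report_good (PySem.List.slice xs (some (i:Int)) none) inc) ||
         (adj_good xs inc ((i:Int) - 1) ((i:Int) + 1) &&
            report_good (PySem.List.slice xs (some ((i:Int) + 1)) none) inc)) := by
  intro a
  induction hm : i - a generalizing a with
  | zero =>
    intro hai _
    have : a = i := by omega
    subst this
    rw [PySem.List.pyRange_one_cons (by omega : (a:Int) < xs.length)]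
    show skipLoopA xs inc ((a:Int) :: _) = _
    rw [skipLoopA, hbad]
    simp only [Bool.not_false, if_true]
    by_cases h1 : adj_good xs inc ((a:Int) - 2) (a:Int) &&
        report_good (PySem.List.slice xs (some (a:Int)) none) inc
    · simp
    · simp only [h1, Bool.false_eq_true, if_false, Bool.false_or]
      by_cases h2 : adj_good xs inc ((a:Int) - 1) ((a:Int) + 1) &&
          report_good (PySem.List.slice xs (some ((a:Int) + 1)) none) inc
      · simp [h2]
      · simp [h2]
  | succ m ih =>
    intro hai H
    rw [PySem.List.pyRange_one_cons (by omega : (a:Int) < xs.length)]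
    show skipLoopA xs inc ((a:Int) :: _) = _
    rw [skipLoopA]
    rw [H a le_rfl (by omega)]
    simp only [Bool.not_true, Bool.false_eq_true, if_false]
    have : ((a:Int) + 1) = ((a+1 : Nat) : Int) := by push_cast; ring
    rw [this]
    exact ih (a+1) (by omega) (by omega) (fun k hk hk2 => H k (by omega) hk2)

theorem rem_getElem (xs : List Int) (j k : Nat) (hj : j < xs.length)
    (hk : k < xs.length - 1) :
    (xs.take j ++ xs.drop (j + 1))[k]'(by
        simp only [List.length_append, List.length_take, List.length_drop]; omega) =
      if k < j then xs[k]'(by omega) else xs[k + 1]'(by omega) := by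
  by_cases h : k < j
  · rw [List.getElem_append_left (by simp [List.length_take]; omega)]
    simp [List.getElem_take, h]
  · rw [List.getElem_append_right (by simp [List.length_take]; omega)]
    simp only [List.getElem_drop]
    rw [if_neg h]
    congr 1
    simp [List.length_take]
    omega

theorem pairsOk_drop_iff (inc : Bool) (xs : List Int) (d : Nat) :
    pairsOk inc (xs.drop d) = true ↔
      ∀ k, (h : d + k + 1 < xs.length) →
        pairOk inc (xs[d + k]'(by omega)) (xs[d + k + 1]'(by omega)) = true := by
  rw [pairsOk_iff]
  constructor
  · intro H k h
    have hk : k + 1 < (xs.drop d).length := by simp [List.length_drop]; omega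
    have := H k hk
    simpa [List.getElem_drop, Nat.add_assoc] using this
  · intro H k hk
    have h1 : d + k + 1 < xs.length := by simp [List.length_drop] at hk; omega
    have := H k h1
    simpa [List.getElem_drop, Nat.add_assoc] using this

-- removing j = m (python's i-1): brute-force rescan = A's first repair test
theorem remF_m (xs : List Int) (inc : Bool) (m : Nat) (hm1 : m + 1 < xs.length)
    (hmin : ∀ k, (hk : k < m) → pairOk inc (xs[k]'(by omega)) (xs[k+1]'(by omega)) = true) :
    pairsOk inc (xs.take m ++ xs.drop (m + 1)) =
      (adj_good xs inc (((m+1 : Nat) : Int) - 2) ((m+1 : Nat) : Int) &&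
        pairsOk inc (xs.drop (m + 1))) := by
  rw [Bool.eq_iff_iff, Bool.and_eq_true, pairsOk_iff, pairsOk_drop_iff]
  have hlen : (xs.take m ++ xs.drop (m + 1)).length = xs.length - 1 := by
    simp [List.length_take, List.length_drop]; omega
  have hadj : adj_good xs inc (((m+1 : Nat) : Int) - 2) ((m+1 : Nat) : Int) =
      if h : 1 ≤ m then pairOk inc (xs[m-1]'(by omega)) (xs[m+1]'(by omega)) else true := by
    by_cases h : 1 ≤ m
    · rw [dif_pos h]
      have e : (((m+1 : Nat) : Int) - 2) = ((m - 1 : Nat) : Int) := by push_cast; omega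
      rw [e, adj_good_nat xs inc (m-1) (m+1) (by omega) hm1]
    · rw [dif_neg h]
      exact adj_good_neg_left _ _ _ _ (by push_cast; omega)
  constructor
  · intro H
    refine ⟨?_, ?_⟩
    · rw [hadj]
      by_cases h : 1 ≤ m
      · rw [dif_pos h]
        have hk : (m - 1) + 1 < (xs.take m ++ xs.drop (m + 1)).length := by omega
        have := H (m-1) hk
        rw [rem_getElem xs m (m-1) (by omega) (by omega),
            rem_getElem xs m (m-1+1) (by omega) (by omega)] at this
        rw [if_pos (by omega), if_neg (by omega)] at this
        have e1 : m - 1 + 1 + 1 = m + 1 := by omega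
        simp only [e1] at this
        exact this
      · rw [dif_neg h]
    · intro k h
      have hk : (m + k) + 1 < (xs.take m ++ xs.drop (m + 1)).length := by omega
      have := H (m + k) hk
      rw [rem_getElem xs m (m+k) (by omega) (by omega),
          rem_getElem xs m (m+k+1) (by omega) (by omega)] at this
      rw [if_neg (by omega), if_neg (by omega)] at this
      have e1 : m + 1 + k = m + k + 1 := by omega
      have e2 : m + 1 + k + 1 = m + k + 1 + 1 := by omega
      simp only [e1]
      exact this
  · rintro ⟨hb, hd⟩ k h
    rw [hlen] at h
    rw [rem_getElem xs m k (by omega) (by omega),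
        rem_getElem xs m (k+1) (by omega) (by omega)]
    by_cases h1 : k + 1 < m
    · rw [if_pos (by omega), if_pos h1]
      exact hmin k (by omega)
    · by_cases h2 : k + 1 = m
      · rw [if_pos (by omega), if_neg (by omega)]
        rw [hadj, dif_pos (by omega)] at hb
        have e1 : m - 1 = k := by omega
        have e2 : m + 1 = k + 1 + 1 := by omega
        simp only [e1, e2] at hb
        exact hb
      · rw [if_neg (by omega), if_neg (by omega)]
        have := hd (k - m) (by omega)
        have e1 : m + 1 + (k - m) = k + 1 := by omega
        have e2 : m + 1 + (k - m) + 1 = k + 1 + 1 := by omega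
        simp only [e1] at this
        exact this

-- removing j = m+1 (python's i): brute-force rescan = A's second repair test
theorem remF_m1 (xs : List Int) (inc : Bool) (m : Nat) (hm1 : m + 1 < xs.length)
    (hmin : ∀ k, (hk : k < m) → pairOk inc (xs[k]'(by omega)) (xs[k+1]'(by omega)) = true) :
    pairsOk inc (xs.take (m+1) ++ xs.drop (m + 2)) =
      (adj_good xs inc (((m+1 : Nat) : Int) - 1) (((m+1 : Nat) : Int) + 1) &&
        pairsOk inc (xs.drop (m + 2))) := by
  rw [Bool.eq_iff_iff, Bool.and_eq_true, pairsOk_iff, pairsOk_drop_iff]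
  have hlen : (xs.take (m+1) ++ xs.drop (m + 2)).length = xs.length - 1 := by
    simp [List.length_take, List.length_drop]; omega
  have hadj : adj_good xs inc (((m+1 : Nat) : Int) - 1) (((m+1 : Nat) : Int) + 1) =
      if h : m + 2 < xs.length then pairOk inc (xs[m]'(by omega)) (xs[m+2]'(by omega))
      else true := by
    by_cases h : m + 2 < xs.length
    · rw [dif_pos h]
      have e1 : (((m+1 : Nat) : Int) - 1) = ((m : Nat) : Int) := by push_cast; omega
      have e2 : (((m+1 : Nat) : Int) + 1) = ((m + 2 : Nat) : Int) := by push_cast; omega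
      rw [e1, e2, adj_good_nat xs inc m (m+2) (by omega) h]
    · rw [dif_neg h]
      exact adj_good_ge_right _ _ _ _ (by push_cast; omega)
  constructor
  · intro H
    refine ⟨?_, ?_⟩
    · rw [hadj]
      by_cases h : m + 2 < xs.length
      · rw [dif_pos h]
        have hk : m + 1 < (xs.take (m+1) ++ xs.drop (m + 2)).length := by omega
        have := H m hk
        rw [rem_getElem xs (m+1) m (by omega) (by omega),
            rem_getElem xs (m+1) (m+1) (by omega) (by omega)] at this
        rw [if_pos (by omega), if_neg (by omega)] at this
        have e1 : m + 1 + 1 = m + 2 := by omega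
        simp only [e1] at this
        exact this
      · rw [dif_neg h]
    · intro k h
      have hk : (m + 1 + k) + 1 < (xs.take (m+1) ++ xs.drop (m + 2)).length := by omega
      have := H (m + 1 + k) hk
      rw [rem_getElem xs (m+1) (m+1+k) (by omega) (by omega),
          rem_getElem xs (m+1) (m+1+k+1) (by omega) (by omega)] at this
      rw [if_neg (by omega), if_neg (by omega)] at this
      have e1 : m + 2 + k = m + 1 + k + 1 := by omega
      have e2 : m + 2 + k + 1 = m + 1 + k + 1 + 1 := by omega
      simp only [e1]
      exact this
  · rintro ⟨hb, hd⟩ k h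
    rw [hlen] at h
    rw [rem_getElem xs (m+1) k (by omega) (by omega),
        rem_getElem xs (m+1) (k+1) (by omega) (by omega)]
    by_cases h1 : k + 1 < m + 1
    · rw [if_pos (by omega), if_pos h1]
      exact hmin k (by omega)
    · by_cases h2 : k = m
      · rw [if_pos (by omega), if_neg (by omega)]
        rw [hadj, dif_pos (by omega)] at hb
        have e1 : m = k := by omega
        have e2 : m + 2 = k + 1 + 1 := by omega
        simp only [e1] at hb
        exact hb
      · rw [if_neg (by omega), if_neg (by omega)]
        have := hd (k - (m+1)) (by omega)
        have e1 : m + 2 + (k - (m+1)) = k + 1 := by omega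
        have e2 : m + 2 + (k - (m+1)) + 1 = k + 1 + 1 := by omega
        simp only [e1] at this
        exact this

-- removing any other index leaves the bad pair adjacent
theorem remF_other (xs : List Int) (inc : Bool) (m j : Nat) (hm1 : m + 1 < xs.length)
    (hbad : pairOk inc (xs[m]'(by omega)) (xs[m+1]'(by omega)) = false)
    (hj : j < xs.length) (hjm : j ≠ m) (hjm1 : j ≠ m + 1) :
    pairsOk inc (xs.take j ++ xs.drop (j + 1)) = false := by
  rw [Bool.eq_false_iff, Ne, pairsOk_iff]
  intro H
  by_cases hlt : j < m
  · have hk : (m - 1) + 1 < (xs.take j ++ xs.drop (j + 1)).length := by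
      simp [List.length_take, List.length_drop]; omega
    have := H (m - 1) hk
    rw [rem_getElem xs j (m-1) (by omega) (by omega),
        rem_getElem xs j (m-1+1) (by omega) (by omega)] at this
    rw [if_neg (by omega), if_neg (by omega)] at this
    have e1 : m - 1 + 1 = m := by omega
    have e2 : m - 1 + 1 + 1 = m + 1 := by omega
    simp only [e1] at this
    rw [hbad] at this
    exact Bool.false_ne_true this
  · have hgt : m + 1 < j := by omega
    have hk : m + 1 < (xs.take j ++ xs.drop (j + 1)).length := by
      simp [List.length_take, List.length_drop]; omega
    have := H m hk
    rw [rem_getElem xs j m (by omega) (by omega),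
        rem_getElem xs j (m+1) (by omega) (by omega)] at this
    rw [if_pos (by omega), if_pos (by omega)] at this
    rw [hbad] at this
    exact Bool.false_ne_true this

theorem pairsOk_short (inc : Bool) (xs : List Int) (h : xs.length ≤ 1) :
    pairsOk inc xs = true := by
  match xs, h with
  | [], _ => rfl
  | [x], _ => rfl

theorem main_eq (xs : List Int) (inc : Bool) :
    report_good_with_skip xs inc = report_good_with_skip_alt xs inc := by
  by_cases hn : xs.length ≤ 1
  · rw [report_good_with_skip, if_pos hn, report_good_with_skip_alt,
        pairsOk_short inc xs hn, Bool.true_or]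
  · rw [report_good_with_skip, if_neg hn]
    by_cases hall : ∀ k, (h : k + 1 < xs.length) → pairOk inc xs[k] xs[k+1] = true
    · have hA : skipLoopA xs inc (PySem.List.pyRange 1 xs.length 1) = true := by
        have := skipLoopA_all xs inc 1 (fun k hk hkn => by
          have e : ((k:Int) - 1) = ((k - 1 : Nat) : Int) := by omega
          have e2 : ((k:Int)) = (((k - 1) + 1 : Nat) : Int) := by push_cast; omega
          rw [e, e2, adj_good_nat xs inc (k-1) ((k-1)+1) (by omega) (by omega)]
          exact hall (k-1) (by omega))
        simpa using this
      rw [hA, report_good_with_skip_alt, (pairsOk_iff inc xs).mpr hall, Bool.true_or]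
    · -- there is a bad adjacent pair; take the least index m
      have hex : ∃ k, k + 1 < xs.length ∧ pairOk inc (xs.getD k 0) (xs.getD (k+1) 0) = false := by
        by_contra hno
        push Not at hno
        apply hall
        intro k h
        have := hno k
        rw [List.getD_eq_getElem xs 0 (by omega), List.getD_eq_getElem xs 0 h] at this
        rcases Bool.eq_false_or_eq_true (pairOk inc xs[k] xs[k+1]) with ht | hf
        · exact ht
        · exact absurd hf (this h)
      classical
      set m := Nat.find hex with hmdef
      obtain ⟨hm1, hbadD⟩ := Nat.find_spec hex
      have hbadP : pairOk inc (xs[m]'(by omega)) (xs[m+1]'hm1) = false := by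
        rwa [List.getD_eq_getElem xs 0 (by omega), List.getD_eq_getElem xs 0 hm1] at hbadD
      have hmin : ∀ k, (hk : k < m) → pairOk inc (xs[k]'(by omega)) (xs[k+1]'(by omega)) = true := by
        intro k hk
        have := Nat.find_min hex hk
        rw [not_and_or] at this
        rcases this with h1 | h2
        · omega
        · rw [List.getD_eq_getElem xs 0 (by omega), List.getD_eq_getElem xs 0 (by omega)] at h2
          rcases Bool.eq_false_or_eq_true (pairOk inc (xs[k]'(by omega)) (xs[k+1]'(by omega))) with ht | hf
          · exact ht
          · exact absurd hf h2
      have hbadA : adj_good xs inc (((m+1 : Nat) : Int) - 1) ((m+1 : Nat) : Int) = false := by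
        have e : (((m+1 : Nat) : Int) - 1) = ((m : Nat) : Int) := by push_cast; omega
        rw [e, adj_good_nat xs inc m (m+1) (by omega) hm1]
        exact hbadP
      have hA := skipLoopA_first xs inc (m+1) hm1 hbadA 1 (by omega) (fun k hk1 hkm => by
        have e : ((k:Int) - 1) = ((k - 1 : Nat) : Int) := by omega
        have e2 : ((k:Int)) = (((k - 1) + 1 : Nat) : Int) := by push_cast; omega
        rw [e, e2, adj_good_nat xs inc (k-1) ((k-1)+1) (by omega) (by omega)]
        exact hmin (k-1) (by omega))
      have hA' : skipLoopA xs inc (PySem.List.pyRange 1 xs.length 1) =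
          ((adj_good xs inc (((m+1:Nat) : Int) - 2) ((m+1:Nat) : Int) &&
              report_good (PySem.List.slice xs (some ((m+1:Nat) : Int)) none) inc) ||
           (adj_good xs inc (((m+1:Nat) : Int) - 1) (((m+1:Nat) : Int) + 1) &&
              report_good (PySem.List.slice xs (some (((m+1:Nat) : Int) + 1)) none) inc)) := by
        simpa using hA
      rw [hA']
      -- rewrite the two slices / report_good into B's vocabulary
      have hs1 : PySem.List.slice xs (some ((m+1:Nat) : Int)) none = xs.drop (m+1) :=
        PySem.List.slice_from_natCast xs (m+1)
      have hs2 : PySem.List.slice xs (some (((m+1:Nat) : Int) + 1)) none = xs.drop (m+2) := by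
        have e : (((m+1:Nat) : Int) + 1) = ((m+2 : Nat) : Int) := by push_cast; ring
        rw [e]
        exact PySem.List.slice_from_natCast xs (m+2)
      rw [hs1, hs2, reportGood_eq, reportGood_eq]
      rw [← remF_m xs inc m hm1 hmin, ← remF_m1 xs inc m hm1 hmin]
      -- B side: pairsOk xs is false; the any-scan hits only j = m and j = m+1
      have hpf : pairsOk inc xs = false := by
        rw [Bool.eq_false_iff, Ne, pairsOk_iff]
        intro hT
        rw [hT m hm1] at hbadP
        exact Bool.noConfusion hbadP
      rw [report_good_with_skip_alt, hpf, Bool.false_or]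
      rw [Bool.eq_iff_iff, Bool.or_eq_true, List.any_eq_true]
      constructor
      · rintro (h1 | h2)
        · exact ⟨m, List.mem_range.mpr (by omega), h1⟩
        · refine ⟨m+1, List.mem_range.mpr (by omega), ?_⟩
          have e : m + 1 + 1 = m + 2 := by omega
          rw [e]
          exact h2
      · rintro ⟨j, hjr, hjt⟩
        rw [List.mem_range] at hjr
        by_cases hj1 : j = m
        · subst hj1
          exact Or.inl hjt
        · by_cases hj2 : j = m + 1
          · subst hj2
            right
            have e : m + 1 + 1 = m + 2 := by omega
            rw [e] at hjt
            exact hjt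
          · rw [remF_other xs inc m j hm1 hbadP hjr hj1 hj2] at hjt
            exact absurd hjt Bool.false_ne_true

-- ===== VERDICT (by name: the statement is the Claim_ definition above) =====
theorem report_good_with_skip_spec : Claim_equal_report_good_with_skip := by
  intro report inc _
  unfold Spec_report_good_with_skip
  exact main_eq report inc
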